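-- pv_equiv track=rewrite | github.com/ShadWriter06/Shadbot | qbtest.py | findVar
-- ===== SOURCE A (Python) =====
-- def findVar(parameter,string):
--     x1 = 0
--     y =""
--     for i in string:
--         if i in parameter:
--             x1 = x1 + 1
--         if x1 == 1:
--             y += i
--     return y
-- ===== SOURCE B (Python) =====
-- def findVar(parameter, string):
--     start = None
--     for i, c in enumerate(string):
--         if c in parameter:
--             start = i
--             break
--     if start is None:
--         return ""
--     end = len(string)
--     for j in range(start + 1, len(string)):
--         if string[j] in parameter:
--             end = j
--             break
--     return string[start:end]
-- ===== Notes on version B (the rewrite author's own statement) =====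
-- stated objective: simpler
-- what changed: Replaces A's counter-and-accumulate character loop with locating the two boundary indices (first parameter-char, next parameter-char or end of string) and returning a single slice.
import Mathlib
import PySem

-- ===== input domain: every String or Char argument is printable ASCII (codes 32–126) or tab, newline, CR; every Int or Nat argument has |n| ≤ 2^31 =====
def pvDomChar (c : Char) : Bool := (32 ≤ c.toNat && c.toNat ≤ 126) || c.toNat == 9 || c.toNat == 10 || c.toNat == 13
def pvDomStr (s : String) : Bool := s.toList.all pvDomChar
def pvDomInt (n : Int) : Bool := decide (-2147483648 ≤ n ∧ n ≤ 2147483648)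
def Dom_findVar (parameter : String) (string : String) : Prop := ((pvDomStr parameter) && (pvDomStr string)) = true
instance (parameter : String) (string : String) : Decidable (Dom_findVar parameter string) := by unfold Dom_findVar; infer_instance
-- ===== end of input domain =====

-- B locates the two boundary indices (first parameter-char, next one or end) and returns one
-- slice, instead of A's counter-and-accumulate loop; objective: a simpler decomposition.

-- ===== PORT A =====
-- A's for-loop over `string` with state (x1, y), transliterated as structural recursion
def findVarLoop (f : Char → Bool) : List Char → Int → List Char → List Char
  | [], _, y => y
  | i :: rest, x1, y =>
      let x1' := if f i then x1 + 1 else x1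
      findVarLoop f rest x1' (if x1' = 1 then y ++ [i] else y)

def findVar (parameter : String) (string : String) : String :=
  String.mk (findVarLoop (fun c => parameter.toList.contains c) string.toList 0 [])

-- ===== PORT B =====
-- Source B: find index of first char in `parameter` (else return ""), then the next such index
-- (else len(string)), and return the slice between them.
def findVar_alt (parameter : String) (string : String) : String :=
  match string.toList.findIdx? (fun c => parameter.toList.contains c) with
  | none => ""
  | some start =>
      String.mk ((string.toList.drop start).take
        ((match (string.toList.drop (start + 1)).findIdx? (fun c => parameter.toList.contains c) with
          | none => string.toList.length
          | some j => start + 1 + j) - start))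

-- ===== PRECONDITION & SPEC =====
def Spec_findVar (parameter : String) (string : String) (out : String) : Prop := out = findVar_alt parameter string
instance (parameter : String) (string : String) (out : String) : Decidable (Spec_findVar parameter string out) := by unfold Spec_findVar; infer_instance

-- ===== CLAIM (what is proved, stated in full; the proofs are below) =====
def Claim_equal_findVar : Prop := ∀ (parameter : String) (string : String), Dom_findVar parameter string → Spec_findVar parameter string (findVar parameter string)

-- ===== LEMMAS AND PROOFS =====

-- B's slice computation over a plain list, for the induction
def bval (f : Char → Bool) (l : List Char) : List Char :=
  match l.findIdx? f with
  | none => []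
  | some start =>
      (l.drop start).take
        ((match (l.drop (start + 1)).findIdx? f with
          | none => l.length
          | some j => start + 1 + j) - start)

theorem findVar_alt_eq (parameter string : String) :
    findVar_alt parameter string = String.mk (bval (fun c => parameter.toList.contains c) string.toList) := by
  unfold findVar_alt bval
  cases h : string.toList.findIdx? (fun c => parameter.toList.contains c) <;> rfl

-- once x1 ≥ 2 the loop emits nothing
theorem loop_ge2 (f : Char → Bool) (l : List Char) (x1 : Int) (y : List Char) (h : 2 ≤ x1) :
    findVarLoop f l x1 y = y := by
  induction l generalizing x1 y with
  | nil => rfl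
  | cons c rest ih =>
      simp only [findVarLoop]
      by_cases hf : f c = true <;> simp only [hf, if_true, if_false, Bool.false_eq_true]
      · rw [if_neg (by omega), ih (x1 + 1) y (by omega)]
      · rw [if_neg (by omega), ih x1 y h]

-- in phase 1 the loop emits the longest prefix of non-f chars
theorem loop_one (f : Char → Bool) (l : List Char) (y : List Char) :
    findVarLoop f l 1 y = y ++ l.takeWhile (fun c => !f c) := by
  induction l generalizing y with
  | nil => simp [findVarLoop]
  | cons c rest ih =>
      simp only [findVarLoop, List.takeWhile_cons]
      by_cases hf : f c = true <;>
        simp only [hf, if_true, if_false, Bool.false_eq_true, Bool.not_true, Bool.not_false]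
      · rw [if_neg (by norm_num), loop_ge2 f rest (1 + 1) y (by norm_num)]
        simp
      · rw [ih]
        simp

-- take up to the first index where f holds = takeWhile ¬f
theorem take_findIdx (f : Char → Bool) (l : List Char) :
    l.take (match l.findIdx? f with
             | none => l.length
             | some j => j) = l.takeWhile (fun c => !f c) := by
  induction l with
  | nil => rfl
  | cons c rest ih =>
      by_cases hf : f c = true
      · simp [List.findIdx?_cons, hf]
      · have key : (match List.findIdx? f (c :: rest) with
                    | none => (c :: rest).length
                    | some j => j) =
            (match rest.findIdx? f with
             | none => rest.length
             | some j => j) + 1 := by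
          rw [List.findIdx?_cons, if_neg hf]
          cases rest.findIdx? f <;> simp
        rw [key, List.take_succ_cons, ih, List.takeWhile_cons]
        simp [hf]

-- B's slice of c :: rest when c is a parameter char: c plus the non-parameter prefix of rest
theorem bval_cons_pos (f : Char → Bool) (c : Char) (rest : List Char) (hf : f c = true) :
    bval f (c :: rest) = c :: rest.takeWhile (fun x => !f x) := by
  unfold bval
  simp only [List.findIdx?_cons, hf, if_true, List.drop_succ_cons, List.drop_zero, Nat.sub_zero]
  have key : (match rest.findIdx? f with
              | none => (c :: rest).length
              | some j => 0 + 1 + j) =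
      (match rest.findIdx? f with
       | none => rest.length
       | some j => j) + 1 := by
    cases rest.findIdx? f with
    | none => simp
    | some j => show 0 + 1 + j = j + 1; omega
  rw [key, List.take_succ_cons, take_findIdx]

-- B's slice ignores a leading non-parameter char
theorem bval_cons_neg (f : Char → Bool) (c : Char) (rest : List Char) (hf : ¬ f c = true) :
    bval f rest = bval f (c :: rest) := by
  unfold bval
  simp only [List.findIdx?_cons, hf, Bool.false_eq_true, if_false]
  cases h : rest.findIdx? f with
  | none => simp
  | some s =>
      simp only [Option.map_some, List.drop_succ_cons]
      cases h2 : (rest.drop (s + 1)).findIdx? f with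
      | none =>
          simp only [List.length_cons]
          rw [show rest.length + 1 - (s + 1) = rest.length - s from by omega]
      | some j =>
          show List.take (s + 1 + j - s) _ = List.take (s + 1 + 1 + j - (s + 1)) _
          rw [show s + 1 + 1 + j - (s + 1) = s + 1 + j - s from by omega]

-- the main loop invariant: phase 0 produces exactly B's slice
theorem loop_zero (f : Char → Bool) (l : List Char) (y : List Char) :
    findVarLoop f l 0 y = y ++ bval f l := by
  induction l generalizing y with
  | nil => simp [findVarLoop, bval]
  | cons c rest ih =>
      simp only [findVarLoop]
      by_cases hf : f c = true
      · simp only [hf, if_true, zero_add, if_pos rfl]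
        rw [loop_one, bval_cons_pos f c rest hf]
        simp
      · simp only [hf, Bool.false_eq_true, if_false]
        rw [if_neg (by norm_num), ih, ← bval_cons_neg f c rest hf]

-- ===== VERDICT (by name: the statement is the Claim_ definition above) =====
theorem findVar_spec : Claim_equal_findVar := by
  intro parameter string _
  unfold Spec_findVar
  rw [findVar_alt_eq]
  unfold findVar
  rw [loop_zero]
  simp
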